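-- pv_equiv track=rewrite | github.com/connectedcars/stau | src/stau_executor.py | work_ids_to_range
-- ===== SOURCE A (Python) =====
-- import itertools
--
-- def work_ids_to_range(work_ids):
--     """Convert a list of work ids to ranges
--
--     This function takes a list of work ids (ints) and converts any ranges
--     within the list to tuples. This is a more compressed way to store a lot
--     of ids in the database.
--
--     Args:
--         work_ids (list): List of work ids
--
--     Returns:
--         work_range (iterator): Tuple of range pairs from the list
--
--     Examples:
--         > list(work_ids_to_range([0, 1, 2, 3, 4, 7, 8, 9, 11]))
--           [(0, 4), (7, 9), (11,)]
--     """
--     unique_ids = sorted(list(set(work_ids)))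
--
--     # The groupby below matches consecutive integers that are only a single whole number apart into the
--     # same group. Once the next and previous integer are more than 1 apart a new group is formed.
--     for a, b in itertools.groupby(
--         enumerate(unique_ids), key=(lambda pair: pair[1] - pair[0])
--     ):
--         b = list(b)
--         if b[0][1] == b[-1][1]:
--             # If the current range only contains a single number just return that number. E.g. (12, )
--             yield (b[0][1],)
--         else:
--             # If the range contains multiple numbers return the first and list. E.g. (10, 12)
--             yield b[0][1], b[-1][1]
-- ===== SOURCE B (Python) =====
-- def work_ids_to_range(work_ids):
--     """Compress ids into ranges via set membership: a run starts at an id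
--     whose predecessor is absent and ends at an id whose successor is absent;
--     pairing the sorted starts with the sorted ends gives the ranges."""
--     s = set(work_ids)
--     starts = sorted(x for x in s if x - 1 not in s)
--     ends = sorted(x for x in s if x + 1 not in s)
--     for a, b in zip(starts, ends):
--         yield (a,) if a == b else (a, b)
-- ===== Notes on version B (the rewrite author's own statement) =====
-- stated objective: alternative
-- what changed: Replaces the groupby-over-enumerate adjacency scan with a set-membership algorithm: run starts are ids x with x-1 not in the set, run ends are ids x with x+1 not in the set, and zipping the sorted starts with the sorted ends yields the ranges.
import Mathlib
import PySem

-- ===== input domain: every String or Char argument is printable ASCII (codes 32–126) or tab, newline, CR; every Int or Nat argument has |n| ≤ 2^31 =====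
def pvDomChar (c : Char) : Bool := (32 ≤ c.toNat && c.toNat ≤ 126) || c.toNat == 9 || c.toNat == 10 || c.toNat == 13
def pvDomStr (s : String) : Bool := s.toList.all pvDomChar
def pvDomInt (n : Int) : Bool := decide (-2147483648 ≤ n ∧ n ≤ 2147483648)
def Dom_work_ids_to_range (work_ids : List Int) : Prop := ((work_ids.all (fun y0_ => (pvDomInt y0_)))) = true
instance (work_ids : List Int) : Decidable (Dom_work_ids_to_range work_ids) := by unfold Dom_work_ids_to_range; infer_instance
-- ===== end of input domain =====

-- B replaces A's groupby/enumerate adjacency scan with a set-membership algorithm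
-- (run starts = ids whose predecessor is absent, run ends = ids whose successor is
-- absent, zipped after sorting); same cost, genuinely different strategy.
-- Both are generators in Python; equivalence is about the yielded sequence (list(...)).

-- ===== PORT A =====
-- key = lambda pair: pair[1] - pair[0]
def pvKeyA (p : Int × Int) : Int := p.2 - p.1

-- itertools.groupby on the enumerated list: maximal runs of equal keys
def pvGroupbyA (l : List (Int × Int)) : List (List (Int × Int)) :=
  match l with
  | [] => []
  | x :: xs =>
    (x :: xs.takeWhile (fun y => pvKeyA y == pvKeyA x)) ::
      pvGroupbyA (xs.dropWhile (fun y => pvKeyA y == pvKeyA x))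
termination_by l.length
decreasing_by simp; exact List.length_dropWhile_le _ _

-- body of the for loop: b = list(b); yield (b[0][1],) or (b[0][1], b[-1][1])
def pvEmitA (b : List (Int × Int)) : List Int :=
  match b with
  | [] => []  -- unreachable: groupby yields nonempty groups
  | p :: rest =>
    let last := rest.getLastD p
    if p.2 = last.2 then [p.2] else [p.2, last.2]

def work_ids_to_range (work_ids : List Int) : List (List Int) :=
  let unique_ids := PySem.List.sorted (PySem.Set.ofList work_ids) (fun x => x) false
  (pvGroupbyA (PySem.List.enumerate unique_ids)).map pvEmitA

-- ===== PORT B =====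
-- s = set(work_ids); starts = sorted(x for x in s if x-1 not in s);
-- ends = sorted(x for x in s if x+1 not in s); zip and emit (a,) / (a, b)
def work_ids_to_range_alt (work_ids : List Int) : List (List Int) :=
  let s : PySem.Set Int := PySem.Set.ofList work_ids
  let starts := PySem.List.sorted (s.filter (fun x => !(PySem.Set.contains s (x - 1)))) (fun x => x) false
  let ends := PySem.List.sorted (s.filter (fun x => !(PySem.Set.contains s (x + 1)))) (fun x => x) false
  List.zipWith (fun a b => if a = b then [a] else [a, b]) starts ends

-- ===== PRECONDITION & SPEC =====
def Spec_work_ids_to_range (work_ids : List Int) (out : List (List Int)) : Prop := out = work_ids_to_range_alt work_ids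
instance (work_ids : List Int) (out : List (List Int)) : Decidable (Spec_work_ids_to_range work_ids out) := by unfold Spec_work_ids_to_range; infer_instance

-- ===== CLAIM (what is proved, stated in full; the proofs are below) =====
def Claim_equal_work_ids_to_range : Prop := ∀ (work_ids : List Int), Dom_work_ids_to_range work_ids → Spec_work_ids_to_range work_ids (work_ids_to_range work_ids)

-- ===== LEMMAS AND PROOFS =====

lemma pvGroupbyA_nil : pvGroupbyA [] = [] := by rw [pvGroupbyA]

lemma pvGroupbyA_cons (x : Int × Int) (xs : List (Int × Int)) :
    pvGroupbyA (x :: xs) =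
      (x :: xs.takeWhile (fun y => pvKeyA y == pvKeyA x)) ::
        pvGroupbyA (xs.dropWhile (fun y => pvKeyA y == pvKeyA x)) := by
  rw [pvGroupbyA]

-- the maximal consecutive run after prev, and what remains
def pvTakeC (prev : Int) : List Int → List Int
  | [] => []
  | x :: xs => if x = prev + 1 then x :: pvTakeC x xs else []

def pvDropC (prev : Int) : List Int → List Int
  | [] => []
  | x :: xs => if x = prev + 1 then pvDropC x xs else x :: xs

lemma pvSpanC (prev : Int) (xs : List Int) : pvTakeC prev xs ++ pvDropC prev xs = xs := by
  induction xs generalizing prev with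
  | nil => simp [pvTakeC, pvDropC]
  | cons x xs ih =>
    simp only [pvTakeC, pvDropC]
    split
    · simp [ih x]
    · simp

lemma pvDropC_sublist (prev : Int) (xs : List Int) : (pvDropC prev xs).Sublist xs := by
  induction xs generalizing prev with
  | nil => simp [pvDropC]
  | cons x xs ih =>
    simp only [pvDropC]
    split
    · exact (ih x).trans (List.sublist_cons_self x xs)
    · exact List.Sublist.refl _

-- structural facts about the first run and the remainder
lemma run_facts (xs : List Int) : ∀ x : Int, List.Pairwise (· < ·) (x :: xs) →
    (∀ y ∈ pvTakeC x xs, y - 1 ∈ x :: pvTakeC x xs) ∧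
    (∀ y ∈ x :: pvTakeC x xs, y ≤ (pvTakeC x xs).getLastD x) ∧
    (∀ y ∈ x :: pvTakeC x xs, y ≠ (pvTakeC x xs).getLastD x → y + 1 ∈ x :: pvTakeC x xs) ∧
    (∀ y ∈ pvDropC x xs, (pvTakeC x xs).getLastD x + 2 ≤ y) := by
  induction xs with
  | nil => intro x _; simp [pvTakeC, pvDropC]
  | cons z zs ih =>
    intro x hp
    have hp' : List.Pairwise (· < ·) (z :: zs) :=
      hp.sublist (List.sublist_cons_self x (z :: zs))
    by_cases h : z = x + 1
    · obtain ⟨ih1, ih2, ih3, ih4⟩ := ih z hp'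
      simp only [pvTakeC, pvDropC, if_pos h, List.getLastD_cons]
      simp only [List.mem_cons] at *
      refine ⟨?_, ?_, ?_, ih4⟩
      · intro y hy
        rcases hy with hy | hy
        · left; omega
        · rcases ih1 y hy with hh | hh
          · right; left; exact hh
          · right; right; exact hh
      · intro y hy
        rcases hy with hy | hy
        · have := ih2 z (Or.inl rfl); omega
        · exact ih2 y hy
      · intro y hy hne
        rcases hy with hy | hy
        · right; left; omega
        · rcases ih3 y hy hne with hh | hh
          · right; left; exact hh
          · right; right; exact hh
    · have hzx : x < z := (List.pairwise_cons.mp hp).1 z (by simp)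
      simp only [pvTakeC, pvDropC, if_neg h, List.getLastD_nil]
      refine ⟨by simp, by simp, by simp, ?_⟩
      intro y hy
      rcases List.mem_cons.mp hy with hy | hy
      · omega
      · have := (List.pairwise_cons.mp hp').1 y hy; omega

-- filter q l = [a] when l has no duplicates and q characterises a
lemma filter_eq_single (a : Int) (q : Int → Bool) (l : List Int) (hnd : l.Nodup)
    (ha : a ∈ l) (hq : ∀ y ∈ l, q y = true ↔ y = a) : l.filter q = [a] := by
  induction l with
  | nil => cases ha
  | cons b t ih =>
    rcases List.mem_cons.mp ha with hb | hb
    · subst hb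
      have hqa : q a = true := (hq a (by simp)).mpr rfl
      simp only [List.filter_cons, hqa, if_pos]
      have : t.filter q = [] := by
        apply List.filter_eq_nil_iff.mpr
        intro y hy hqy
        have := (hq y (by simp [hy])).mp hqy
        subst this
        exact (List.nodup_cons.mp hnd).1 hy
      rw [this]
    · have hqb : q b = false := by
        rcases Bool.eq_false_or_eq_true (q b) with ht | hf
        · exfalso
          have := (hq b (by simp)).mp ht
          subst this
          exact (List.nodup_cons.mp hnd).1 hb
        · exact hf
      simp only [List.filter_cons, hqb, Bool.false_eq_true, if_false]
      exact ih (List.nodup_cons.mp hnd).2 hb (fun y hy => hq y (by simp [hy]))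

-- last snd of an enumerated list
lemma enumerate_getLastD_snd (t : List Int) : ∀ (j : Int) (p : Int × Int),
    ((PySem.List.enumerate t j).getLastD p).2 = t.getLastD p.2 := by
  induction t with
  | nil => intro j p; simp [PySem.List.enumerate_nil]
  | cons x xs ih =>
    intro j p
    rw [PySem.List.enumerate_cons, List.getLastD_cons, List.getLastD_cons]
    exact ih (j + 1) (j, x)

-- span of the enumerated tail by the key predicate = the consecutive run
lemma takeWhile_enum (xs : List Int) : ∀ (i x : Int), List.Pairwise (· < ·) (x :: xs) →
    (PySem.List.enumerate xs (i + 1)).takeWhile (fun y => pvKeyA y == x - i)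
      = PySem.List.enumerate (pvTakeC x xs) (i + 1) := by
  induction xs with
  | nil => intro i x _; simp [PySem.List.enumerate_nil, pvTakeC]
  | cons y ys ih =>
    intro i x hp
    rw [PySem.List.enumerate_cons]
    by_cases h : y = x + 1
    · have hk : (pvKeyA (i + 1, y) == x - i) = true := by
        simp only [pvKeyA, beq_iff_eq]; omega
      simp only [List.takeWhile_cons, hk, if_pos]
      have hxi : x - i = y - (i + 1) := by omega
      rw [hxi, ih (i + 1) y (hp.sublist (List.sublist_cons_self x (y :: ys)))]
      simp only [pvTakeC, if_pos h, PySem.List.enumerate_cons]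
    · have hlt : x < y := (List.pairwise_cons.mp hp).1 y (by simp)
      have hk : (pvKeyA (i + 1, y) == x - i) = false := by
        simp only [pvKeyA, beq_eq_false_iff_ne, ne_eq]; omega
      simp only [List.takeWhile_cons, hk, Bool.false_eq_true, if_false]
      simp [pvTakeC, h, PySem.List.enumerate_nil]

lemma dropWhile_enum (xs : List Int) : ∀ (i x : Int), List.Pairwise (· < ·) (x :: xs) →
    ∃ j : Int, (PySem.List.enumerate xs (i + 1)).dropWhile (fun y => pvKeyA y == x - i)
      = PySem.List.enumerate (pvDropC x xs) j := by
  induction xs with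
  | nil => intro i x _; exact ⟨i + 1, by simp [PySem.List.enumerate_nil, pvDropC]⟩
  | cons y ys ih =>
    intro i x hp
    rw [PySem.List.enumerate_cons]
    by_cases h : y = x + 1
    · have hk : (pvKeyA (i + 1, y) == x - i) = true := by
        simp only [pvKeyA, beq_iff_eq]; omega
      simp only [List.dropWhile_cons, hk, if_pos]
      have hxi : x - i = y - (i + 1) := by omega
      rw [hxi]
      obtain ⟨j, hj⟩ := ih (i + 1) y (hp.sublist (List.sublist_cons_self x (y :: ys)))
      exact ⟨j, by simp only [pvDropC, if_pos h, hj]⟩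
    · have hlt : x < y := (List.pairwise_cons.mp hp).1 y (by simp)
      have hk : (pvKeyA (i + 1, y) == x - i) = false := by
        simp only [pvKeyA, beq_eq_false_iff_ne, ne_eq]; omega
      simp only [List.dropWhile_cons, hk, Bool.false_eq_true, if_false]
      exact ⟨i + 1, by simp [pvDropC, h, PySem.List.enumerate_cons]⟩

-- boolean membership-test helpers
lemma notc_true (l : List Int) (a : Int) : (!(l.contains a)) = true ↔ a ∉ l := by simp

lemma notc_false (l : List Int) (a : Int) : (!(l.contains a)) = false ↔ a ∈ l := by simp

lemma notc_congr {l m : List Int} (a : Int) (h : a ∈ l ↔ a ∈ m) :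
    (!(l.contains a)) = (!(m.contains a)) := by
  by_cases hm : a ∈ l
  · simp [hm, h.mp hm]
  · have hm2 : a ∉ m := fun hmm => hm (h.mpr hmm)
    simp [hm, hm2]

-- main bridge: A's groupby-map on a strictly increasing list = B's starts/ends zip
lemma groupby_eq_zip (n : Nat) : ∀ (L : List Int), L.length ≤ n → ∀ (i : Int),
    List.Pairwise (· < ·) L →
    (pvGroupbyA (PySem.List.enumerate L i)).map pvEmitA
      = List.zipWith (fun a b => if a = b then [a] else [a, b])
          (L.filter (fun y => !(L.contains (y - 1))))
          (L.filter (fun y => !(L.contains (y + 1)))) := by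
  induction n with
  | zero =>
    intro L hlen i _
    have hL : L = [] := List.eq_nil_of_length_eq_zero (Nat.le_zero.mp hlen)
    subst hL
    simp [PySem.List.enumerate_nil, pvGroupbyA_nil]
  | succ n ih =>
    intro L hlen i hp
    match L with
    | [] => simp [PySem.List.enumerate_nil, pvGroupbyA_nil]
    | x :: xs =>
      obtain ⟨F2, F3, F4, F5⟩ := run_facts xs x hp
      have hspan : pvTakeC x xs ++ pvDropC x xs = xs := pvSpanC x xs
      have hxxs : x :: xs = (x :: pvTakeC x xs) ++ pvDropC x xs := by
        rw [List.cons_append, hspan]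
      have hmem : ∀ a : Int, a ∈ x :: xs ↔ (a ∈ x :: pvTakeC x xs ∨ a ∈ pvDropC x xs) := by
        intro a; rw [hxxs, List.mem_append]
      have hxmin : ∀ y ∈ x :: xs, x ≤ y := by
        intro y hy
        rcases List.mem_cons.mp hy with hy | hy
        · omega
        · have := (List.pairwise_cons.mp hp).1 y hy; omega
      have hxlast : x ≤ (pvTakeC x xs).getLastD x := F3 x (by simp)
      set pS : Int → Bool := fun y => !((x :: xs).contains (y - 1)) with hpS
      set pE : Int → Bool := fun y => !((x :: xs).contains (y + 1)) with hpE
      -- starts filter: [x] then the remainder's own starts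
      have h1 : (x :: pvTakeC x xs).filter pS = [x] := by
        have hx1 : pS x = true := by
          rw [hpS]
          refine (notc_true _ _).mpr ?_
          intro hmm; have := hxmin _ hmm; omega
        have h0 : (pvTakeC x xs).filter pS = [] := by
          refine List.filter_eq_nil_iff.mpr ?_
          intro y hy
          rw [hpS]
          simp only [Bool.not_eq_true]
          exact (notc_false _ _).mpr ((hmem _).mpr (Or.inl (F2 y hy)))
        rw [List.filter_cons, if_pos hx1, h0]
      have h2 : (pvDropC x xs).filter pS
          = (pvDropC x xs).filter (fun y => !((pvDropC x xs).contains (y - 1))) := by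
        refine List.filter_congr ?_
        intro y hy
        have hyge := F5 y hy
        rw [hpS]
        refine notc_congr _ ?_
        rw [hmem]
        constructor
        · rintro (h | h)
          · exfalso; have := F3 _ h; omega
          · exact h
        · exact Or.inr
      have hSfull : (x :: xs).filter pS
          = x :: (pvDropC x xs).filter (fun y => !((pvDropC x xs).contains (y - 1))) := by
        conv_lhs => rw [hxxs]
        rw [List.filter_append, h1, h2, List.singleton_append]
      -- ends filter: the first run's last element, then the remainder's own ends
      have hnR : List.Pairwise (· < ·) (x :: pvTakeC x xs) := by
        refine hp.sublist ?_
        rw [hxxs]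
        exact List.sublist_append_left _ _
      have h3 : (x :: pvTakeC x xs).filter pE = [(pvTakeC x xs).getLastD x] := by
        refine filter_eq_single _ pE _ (hnR.imp (fun h => ne_of_lt h))
          List.getLastD_mem_cons ?_
        intro y hy
        rw [hpE]
        rw [notc_true]
        constructor
        · intro hnm
          by_contra hne
          exact hnm ((hmem _).mpr (Or.inl (F4 y hy hne)))
        · intro hlast
          subst hlast
          rw [hmem]
          rintro (h | h)
          · have := F3 _ h; omega
          · have := F5 _ h; omega
      have h4 : (pvDropC x xs).filter pE
          = (pvDropC x xs).filter (fun y => !((pvDropC x xs).contains (y + 1))) := by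
        refine List.filter_congr ?_
        intro y hy
        have hyge := F5 y hy
        rw [hpE]
        refine notc_congr _ ?_
        rw [hmem]
        constructor
        · rintro (h | h)
          · exfalso; have := F3 _ h; omega
          · exact h
        · exact Or.inr
      have hEfull : (x :: xs).filter pE
          = (pvTakeC x xs).getLastD x
              :: (pvDropC x xs).filter (fun y => !((pvDropC x xs).contains (y + 1))) := by
        conv_lhs => rw [hxxs]
        rw [List.filter_append, h3, h4, List.singleton_append]
      -- assemble both sides
      rw [hSfull, hEfull, List.zipWith_cons_cons,
        PySem.List.enumerate_cons, pvGroupbyA_cons, List.map_cons]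
      have hkx : pvKeyA (i, x) = x - i := rfl
      congr 1
      · -- the first emitted group
        rw [hkx, takeWhile_enum xs i x hp]
        simp only [pvEmitA, enumerate_getLastD_snd]
      · -- the remaining groups
        rw [hkx]
        obtain ⟨j, hj⟩ := dropWhile_enum xs i x hp
        rw [hj]
        have hlen2 : (pvDropC x xs).length ≤ n := by
          have h5 := (pvDropC_sublist x xs).length_le
          simp at hlen; omega
        exact ih (pvDropC x xs) hlen2 j
          ((List.pairwise_cons.mp hp).2.sublist (pvDropC_sublist x xs))

-- ===== VERDICT (by name: the statement is the Claim_ definition above) =====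
theorem work_ids_to_range_spec : Claim_equal_work_ids_to_range := by
  intro work_ids _
  unfold Spec_work_ids_to_range work_ids_to_range work_ids_to_range_alt
  have hp := PySem.List.sorted_ofList_pairwise_lt (xs := work_ids)
  have hperm : (PySem.List.sorted (PySem.Set.ofList work_ids) (fun x => x) false).Perm
      (PySem.Set.ofList work_ids) := PySem.List.sorted_perm _ _ _
  have hstep : ∀ g : Int → Int,
      PySem.List.sorted
          ((PySem.Set.ofList work_ids).filter
            (fun y => !(PySem.Set.contains (PySem.Set.ofList work_ids) (g y))))
          (fun x => x) false
        = (PySem.List.sorted (PySem.Set.ofList work_ids) (fun x => x) false).filter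
            (fun y => !((PySem.List.sorted (PySem.Set.ofList work_ids) (fun x => x) false).contains (g y))) := by
    intro g
    have hcg :
        (PySem.Set.ofList work_ids).filter
            (fun y => !(PySem.Set.contains (PySem.Set.ofList work_ids) (g y)))
          = (PySem.Set.ofList work_ids).filter (fun y =>
              !((PySem.List.sorted (PySem.Set.ofList work_ids) (fun x => x) false).contains (g y))) := by
      refine List.filter_congr ?_
      intro y _
      simp only [PySem.Set.contains_eq_listContains]
      exact notc_congr _ (hperm.mem_iff).symm
    rw [hcg]
    refine PySem.List.sorted_eq_of_perm_of_pairwise_lt _ _ (fun x : Int => x) ?_ ?_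
    · exact hperm.filter _
    · exact hp.sublist List.filter_sublist
  simp only
  rw [hstep (fun y => y - 1), hstep (fun y => y + 1)]
  exact groupby_eq_zip
    (PySem.List.sorted (PySem.Set.ofList work_ids) (fun x => x) false).length _ le_rfl 0 hp
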